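-- pv_equiv track=rewrite | github.com/gurfinkel/codeSignal | tournaments/rounders/rounders.py | rounders
-- ===== SOURCE A (Python) =====
-- def rounders(n):
--
--     p = 10
--     while n > p:
--         if (n % p) // (p // 10) < 5:
--           n = (n // p) * p
--         else:
--           n = (n // p + 1) * p
--         p = p * 10
--     return n
-- ===== SOURCE B (Python) =====
-- def rounders(n):
--     if n < 10:
--         return n
--     last = n % 10
--     value = n // 10
--     if last >= 5:
--         value += 1
--     return 10 * rounders(value)
-- ===== Notes on version B (the rewrite author's own statement) =====
-- stated objective: simpler
-- what changed: Replaced the while-loop that tracks a growing power-of-ten modulus with a recursion that peels the last digit, rounds it into a carry, and multiplies the recursive result by 10.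
import Mathlib
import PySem

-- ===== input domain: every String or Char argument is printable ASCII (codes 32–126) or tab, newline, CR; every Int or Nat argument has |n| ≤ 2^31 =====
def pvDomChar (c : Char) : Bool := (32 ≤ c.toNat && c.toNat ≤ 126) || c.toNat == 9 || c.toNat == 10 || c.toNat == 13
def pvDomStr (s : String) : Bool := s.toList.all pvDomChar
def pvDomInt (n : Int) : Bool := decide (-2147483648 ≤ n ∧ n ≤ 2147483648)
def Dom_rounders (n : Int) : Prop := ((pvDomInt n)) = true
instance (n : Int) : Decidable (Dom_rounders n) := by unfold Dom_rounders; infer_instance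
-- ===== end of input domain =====

-- B replaces A's while-loop over a growing power-of-ten modulus by a recursion that
-- peels the last digit, rounds it into a carry, and multiplies the result by 10 (simpler).

-- ===== PORT A =====
-- A's while-loop; fuel only makes the recursion total (on |n| ≤ 2^31 the loop runs
-- far fewer than 100 passes, since p is multiplied by 10 each pass).
def roundersLoop (fuel : Nat) (n p : Int) : Int :=
  match fuel with
  | 0 => n
  | fuel + 1 =>
    if n > p then
      roundersLoop fuel
        (if PySem.Int.floordiv (PySem.Int.mod n p) (PySem.Int.floordiv p 10) < 5
         then (PySem.Int.floordiv n p) * p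
         else (PySem.Int.floordiv n p + 1) * p)
        (p * 10)
    else n

def rounders (n : Int) : Int := roundersLoop 100 n 10

-- ===== PORT B =====
def rounders_alt (n : Int) : Int :=
  if n < 10 then n
  else
    10 * rounders_alt
      (if PySem.Int.mod n 10 ≥ 5
       then PySem.Int.floordiv n 10 + 1
       else PySem.Int.floordiv n 10)
termination_by n.toNat
decreasing_by
  have hfd : PySem.Int.floordiv n 10 = n / 10 :=
    PySem.Int.floordiv_eq_ediv_of_pos (by norm_num)
  split <;> rw [hfd] <;> omega

-- ===== PRECONDITION & SPEC =====
def Spec_rounders (n : Int) (out : Int) : Prop := out = rounders_alt n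
instance (n : Int) (out : Int) : Decidable (Spec_rounders n out) := by unfold Spec_rounders; infer_instance

-- ===== CLAIM (what is proved, stated in full; the proofs are below) =====
def Claim_equal_rounders : Prop := ∀ (n : Int), Dom_rounders n → Spec_rounders n (rounders n)

-- ===== LEMMAS AND PROOFS =====

theorem pv_fd_pos (a b : Int) (hb : 0 < b) : PySem.Int.floordiv a b = a / b :=
  PySem.Int.floordiv_eq_ediv_of_pos hb

theorem pv_md_pos (a b : Int) (hb : 0 < b) : PySem.Int.mod a b = a % b :=
  PySem.Int.mod_eq_emod_of_pos hb

theorem pv_mul_emod_mul (a b c : Int) (ha : 0 < a) :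
    (a * b) % (a * c) = a * (b % c) := by
  have h := Int.mul_ediv_mul_of_pos b c ha
  rw [Int.emod_def, Int.emod_def, h]
  ring

-- One unfolding of A's loop at a modulus of the form 10·q, with the PySem ops evaluated.
theorem roundersLoop_succ (fuel : Nat) (n q : Int) (hq : 0 < q) :
    roundersLoop (fuel + 1) n (10 * q) =
      if n > 10 * q then
        roundersLoop fuel
          ((if n % (10 * q) / q < 5 then n / (10 * q) else n / (10 * q) + 1) * (10 * q))
          (100 * q)
      else n := by
  have h10q : (0:Int) < 10 * q := by omega
  have e6 : (10 * q) / 10 = q := by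
    rw [mul_comm, Int.mul_ediv_cancel _ (by norm_num : (10:Int) ≠ 0)]
  have e7 : (10 * q) * 10 = 100 * q := by ring
  simp only [roundersLoop, pv_fd_pos _ _ h10q, pv_md_pos _ _ h10q,
    pv_fd_pos _ _ (show (0:Int) < 10 by norm_num), e6, e7]
  split
  · split <;> split <;> simp_all
  · rfl

-- Scaling: running A's loop on 10·m with modulus 100·q computes 10 × the run on m with 10·q.
theorem roundersLoop_scale (fuel : Nat) :
    ∀ (m q : Int), 0 < q →
      roundersLoop fuel (10 * m) (100 * q) = 10 * roundersLoop fuel m (10 * q) := by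
  induction fuel with
  | zero => intro m q hq; simp [roundersLoop]
  | succ fuel ih =>
    intro m q hq
    have hq10 : (0:Int) < 10 * q := by omega
    have h1 : (100:Int) * q = 10 * (10 * q) := by ring
    rw [h1, roundersLoop_succ fuel (10 * m) (10 * q) hq10, roundersLoop_succ fuel m q hq]
    by_cases hc : m > 10 * q
    · rw [if_pos (by omega), if_pos hc]
      have edig : (10 * m) % (10 * (10 * q)) / (10 * q) = m % (10 * q) / q := by
        rw [pv_mul_emod_mul 10 m (10 * q) (by norm_num),
            Int.mul_ediv_mul_of_pos (m % (10 * q)) q (by norm_num : (0:Int) < 10)]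
      have equot : (10 * m) / (10 * (10 * q)) = m / (10 * q) :=
        Int.mul_ediv_mul_of_pos m (10 * q) (by norm_num)
      rw [edig, equot]
      have harg :
          (if m % (10 * q) / q < 5 then m / (10 * q) else m / (10 * q) + 1) * (10 * (10 * q))
            = 10 * ((if m % (10 * q) / q < 5 then m / (10 * q) else m / (10 * q) + 1) * (10 * q)) := by
        split <;> ring
      rw [harg, ih _ (10 * q) hq10, h1]
    · rw [if_neg (by omega), if_neg hc]

theorem rounders_alt_one : rounders_alt 1 = 1 := by
  rw [rounders_alt]; norm_num

theorem rounders_alt_ten : rounders_alt 10 = 10 := by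
  rw [rounders_alt]
  norm_num [pv_md_pos 10 10 (by norm_num), pv_fd_pos 10 10 (by norm_num), rounders_alt_one]

theorem loop_eq_alt (fuel : Nat) :
    ∀ (n : Int), n ≤ 10 ^ (fuel + 1) → roundersLoop fuel n 10 = rounders_alt n := by
  induction fuel with
  | zero =>
    intro n hn
    norm_num at hn
    by_cases h : n < 10
    · rw [rounders_alt, if_pos h]; rfl
    · have : n = 10 := by omega
      subst this
      simpa [roundersLoop] using rounders_alt_ten.symm
  | succ fuel ih =>
    intro n hn
    have hK : (0:Int) < 10 ^ (fuel + 1) := by positivity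
    have hpow : (10:Int) ^ (fuel + 1 + 1) = 10 * 10 ^ (fuel + 1) := by ring
    rw [hpow] at hn
    have hsucc := roundersLoop_succ fuel n 1 (by norm_num)
    norm_num at hsucc
    by_cases hgt : n > 10
    · rw [hsucc, if_pos hgt]
      set u : Int := if n % 10 < 5 then n / 10 else n / 10 + 1 with hu
      have harg : (if n % 10 < 5 then n / 10 * 10 else (n / 10 + 1) * 10) = 10 * u := by
        rw [hu]; split <;> ring
      have h100 : (100:Int) = 100 * 1 := by norm_num
      rw [harg, h100, roundersLoop_scale fuel u 1 (by norm_num)]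
      have h101 : (10:Int) * 1 = 10 := by norm_num
      rw [h101]
      have hub : u ≤ 10 ^ (fuel + 1) := by
        rw [hu]; split <;> omega
      rw [ih u hub]
      -- right-hand side: one unfolding of B
      conv_rhs => rw [rounders_alt]
      rw [if_neg (show ¬ n < 10 by omega),
          pv_md_pos n 10 (by norm_num), pv_fd_pos n 10 (by norm_num)]
      have hcond : (if n % 10 ≥ 5 then n / 10 + 1 else n / 10) = u := by
        rw [hu]; split_ifs <;> omega
      rw [hcond]
    · rw [hsucc, if_neg hgt]
      by_cases h : n < 10
      · rw [rounders_alt, if_pos h]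
      · have : n = 10 := by omega
        subst this
        exact rounders_alt_ten.symm

-- ===== VERDICT (by name: the statement is the Claim_ definition above) =====
theorem rounders_spec : Claim_equal_rounders := by
  intro n hdom
  unfold Spec_rounders rounders
  have hb : n ≤ 10 ^ (100 + 1) := by
    unfold Dom_rounders pvDomInt at hdom
    simp only [decide_eq_true_eq] at hdom
    have : (2147483648:Int) ≤ 10 ^ 101 := by norm_num
    omega
  exact loop_eq_alt 100 n hb
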